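-- pv_equiv track=rewrite | github.com/samcheyette/CSP-model | special_constraints/nurikabe_constraints.py | is_valid_water_pattern
-- ===== SOURCE A (Python) =====
-- def is_valid_water_pattern(grid_values):
--     """
--     Check if a 3x3 grid has a valid water (0) connectivity pattern.
--
--     A valid pattern has:
--     1. All water cells are orthogonally connected
--     2. No 2x2 pools of water
--
--     Args:
--         grid_values: A 3x3 list of 0s and 1s
--
--     Returns:
--         True if the water pattern is valid, False otherwise
--     """
--     # Find all water cells (0)
--     water_cells = []
--     for r in range(3):
--         for c in range(3):
--             if grid_values[r][c] == 0:
--                 water_cells.append((r, c))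
--
--     if not water_cells:
--         return True
--
--     # If only one water cell, it's isolated and invalid
--     if len(water_cells) == 1:
--         return False
--
--     # Check for 2x2 water pools
--     for r in range(2):
--         for c in range(2):
--             if (grid_values[r][c] == 0 and grid_values[r][c+1] == 0 and
--                 grid_values[r+1][c] == 0 and grid_values[r+1][c+1] == 0):
--                 return False
--
--     # Check connectivity of water cells using BFS
--     visited = set()
--     queue = [water_cells[0]]
--
--     while queue:
--         r, c = queue.pop(0)
--         if (r, c) in visited:
--             continue
--
--         visited.add((r, c))
--
--         # Check orthogonal neighbors
--         for dr, dc in [(0, 1), (1, 0), (0, -1), (-1, 0)]: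
--             nr, nc = r + dr, c + dc
--             if 0 <= nr < 3 and 0 <= nc < 3 and grid_values[nr][nc] == 0 and (nr, nc) not in visited:
--                 queue.append((nr, nc))
--
--     # Check if all water cells were visited
--     return len(visited) == len(water_cells)
-- ===== SOURCE B (Python) =====
-- def is_valid_water_pattern(grid_values):
--     """Union-find version: same result as the BFS implementation."""
--     water = [(r, c) for r in range(3) for c in range(3) if grid_values[r][c] == 0]
--     if not water:
--         return True
--     if len(water) == 1:
--         return False
--     # No 2x2 water pool
--     for r in range(2):
--         for c in range(2):
--             if (grid_values[r][c] == 0 and grid_values[r][c + 1] == 0 and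
--                     grid_values[r + 1][c] == 0 and grid_values[r + 1][c + 1] == 0):
--                 return False
--     # Disjoint-set forest over the 9 cells
--     parent = list(range(9))
--
--     def find(i):
--         while parent[i] != i:
--             i = parent[i]
--         return i
--
--     for r in range(3):
--         for c in range(3):
--             if grid_values[r][c] == 0:
--                 if c < 2 and grid_values[r][c + 1] == 0:
--                     ri, rj = find(3 * r + c), find(3 * r + c + 1)
--                     if ri != rj:
--                         parent[ri] = rj
--                 if r < 2 and grid_values[r + 1][c] == 0:
--                     ri, rj = find(3 * r + c), find(3 * r + c + 3)
--                     if ri != rj: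
--                         parent[ri] = rj
--     roots = {find(3 * r + c) for (r, c) in water}
--     return len(roots) == 1
-- ===== Notes on version B (the rewrite author's own statement) =====
-- stated objective: alternative
-- what changed: Replaces the BFS with visited-set and FIFO queue by a union-find (disjoint-set forest) pass that unions each water cell with its right and down water neighbours and then checks that all water cells share one root; the early returns (no water, single water cell, 2x2 pool) are kept.
import Mathlib
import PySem

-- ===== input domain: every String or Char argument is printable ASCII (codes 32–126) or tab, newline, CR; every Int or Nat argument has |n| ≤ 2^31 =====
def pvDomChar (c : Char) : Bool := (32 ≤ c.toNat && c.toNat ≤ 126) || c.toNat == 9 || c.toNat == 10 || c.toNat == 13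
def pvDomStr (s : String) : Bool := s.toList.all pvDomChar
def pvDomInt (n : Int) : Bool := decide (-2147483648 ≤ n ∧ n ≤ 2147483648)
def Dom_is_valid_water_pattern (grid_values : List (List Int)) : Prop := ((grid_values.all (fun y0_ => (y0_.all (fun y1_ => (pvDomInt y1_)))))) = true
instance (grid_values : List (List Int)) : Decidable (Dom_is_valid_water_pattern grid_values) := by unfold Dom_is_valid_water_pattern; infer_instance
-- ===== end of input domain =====

-- B replaces A's BFS connectivity check by a union-find pass over the 9 cells (alternative
-- data structure, same cost); the early returns (no water / one water cell / 2x2 pool) are kept.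

-- ===== PORT A =====
-- grid_values[r][c] == 0  (out-of-range access is a Python IndexError, excluded by Pre_;
-- here pyGet? returns none there, which compares ≠ some 0)
def isW (grid_values : List (List Int)) (r c : Int) : Bool :=
  ((PySem.List.pyGet? grid_values r).bind (fun row => PySem.List.pyGet? row c)) == some (0 : Int)

-- water_cells collection loop (shared text of both Pythons)
def waterCells (w : Int → Int → Bool) : List (Int × Int) :=
  (PySem.List.pyRange 0 3 1).foldl (fun acc r =>
    (PySem.List.pyRange 0 3 1).foldl (fun acc c =>
      if w r c then acc ++ [(r, c)] else acc) acc) []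

-- the 2x2-pool double loop (identical in both Pythons; the early `return False` becomes `any`)
def hasPool (w : Int → Int → Bool) : Bool :=
  (PySem.List.pyRange 0 2 1).any (fun r => (PySem.List.pyRange 0 2 1).any (fun c =>
    w r c && w r (c + 1) && w (r + 1) c && w (r + 1) (c + 1)))

-- 0 <= nr < 3 and 0 <= nc < 3
def inb (nr nc : Int) : Bool :=
  decide (0 ≤ nr) && decide (nr < 3) && decide (0 ≤ nc) && decide (nc < 3)

-- the neighbour test of A's BFS inner loop
def nbCond (w : Int → Int → Bool) (visited : PySem.Set (Int × Int)) (nr nc : Int) : Bool :=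
  inb nr nc && w nr nc && !(PySem.Set.contains visited (nr, nc))

-- A's `while queue:` loop; the fuel only makes the recursion total (the loop pops one element
-- per step and at most 37 elements are ever enqueued, so fuel 64 is never exhausted)
def bfsA (w : Int → Int → Bool) : Nat → PySem.Set (Int × Int) → List (Int × Int) → PySem.Set (Int × Int)
  | 0, visited, _ => visited
  | _ + 1, visited, [] => visited
  | fuel + 1, visited, (r, c) :: rest =>
    if PySem.Set.contains visited (r, c) then
      bfsA w fuel visited rest
    else
      let visited' := PySem.Set.add visited (r, c)
      let queue' := [((0 : Int), (1 : Int)), (1, 0), (0, -1), (-1, 0)].foldl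
        (fun q d =>
          let nr := r + d.1
          let nc := c + d.2
          if nbCond w visited' nr nc then q ++ [(nr, nc)] else q) rest
      bfsA w fuel visited' queue'

def coreA (w : Int → Int → Bool) : Bool :=
  let water := waterCells w
  if water.isEmpty then true
  else if water.length == 1 then false
  else if hasPool w then false
  else PySem.Set.len (bfsA w 64 PySem.Set.empty [water.head!]) == water.length

def is_valid_water_pattern (grid_values : List (List Int)) : Bool :=
  coreA (isW grid_values)

-- ===== PORT B =====
-- B's `find`: follow parents until a fixed point; fuel 16 only makes the loop total
-- (a parent chain in the 9-cell forest has length at most 8)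
def ufFind (parent : List Int) : Nat → Int → Int
  | 0, i => i
  | fuel + 1, i =>
    let p := PySem.List.pyGetD parent i i
    if p ≠ i then ufFind parent fuel p else i

-- B's inline union: ri, rj = find(i), find(j); if ri != rj: parent[ri] = rj
def ufUnion (parent : List Int) (i j : Int) : List Int :=
  let ri := ufFind parent 16 i
  let rj := ufFind parent 16 j
  if ri ≠ rj then parent.set ri.toNat rj else parent

def coreB (w : Int → Int → Bool) : Bool :=
  let water := waterCells w
  if water.isEmpty then true
  else if water.length == 1 then false
  else if hasPool w then false
  else
    let parent0 := PySem.List.pyRange 0 9 1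
    let parent := (PySem.List.pyRange 0 3 1).foldl (fun par r =>
      (PySem.List.pyRange 0 3 1).foldl (fun par c =>
        if w r c then
          let par := if decide (c < 2) && w r (c + 1) then ufUnion par (3 * r + c) (3 * r + c + 1) else par
          if decide (r < 2) && w (r + 1) c then ufUnion par (3 * r + c) (3 * r + c + 3) else par
        else par) par) parent0
    let roots := PySem.Set.ofList (water.map (fun p => ufFind parent 16 (3 * p.1 + p.2)))
    PySem.Set.len roots == 1

def is_valid_water_pattern_alt (grid_values : List (List Int)) : Bool :=
  coreB (isW grid_values)

-- ===== PRECONDITION & SPEC =====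
-- Pre_ excludes exactly the grids on which Python A raises IndexError: fewer than 3 rows,
-- or one of the first 3 rows shorter than 3.
def Pre_is_valid_water_pattern (grid_values : List (List Int)) : Prop :=
  3 ≤ grid_values.length ∧ ∀ row ∈ grid_values.take 3, 3 ≤ row.length
instance (grid_values : List (List Int)) : Decidable (Pre_is_valid_water_pattern grid_values) := by
  unfold Pre_is_valid_water_pattern; infer_instance

def pvWitness_is_valid_water_pattern : List (List Int) := [[0, 1, 0], [0, 1, 0], [0, 0, 0]]

def Spec_is_valid_water_pattern (grid_values : List (List Int)) (out : Bool) : Prop := out = is_valid_water_pattern_alt grid_values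
instance (grid_values : List (List Int)) (out : Bool) : Decidable (Spec_is_valid_water_pattern grid_values out) := by unfold Spec_is_valid_water_pattern; infer_instance

-- ===== CLAIM (what is proved, stated in full; the proofs are below) =====
def Claim_equal_is_valid_water_pattern : Prop := ∀ (grid_values : List (List Int)), Dom_is_valid_water_pattern grid_values → Pre_is_valid_water_pattern grid_values → Spec_is_valid_water_pattern grid_values (is_valid_water_pattern grid_values)

-- ===== LEMMAS AND PROOFS =====

-- a water pattern as a table of the 9 in-range values (false outside)
def Wtab (b00 b01 b02 b10 b11 b12 b20 b21 b22 : Bool) (r c : Int) : Bool :=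
  if r = 0 then (if c = 0 then b00 else if c = 1 then b01 else if c = 2 then b02 else false)
  else if r = 1 then (if c = 0 then b10 else if c = 1 then b11 else if c = 2 then b12 else false)
  else if r = 2 then (if c = 0 then b20 else if c = 1 then b21 else if c = 2 then b22 else false)
  else false

theorem nbCond_congr (w w' : Int → Int → Bool)
    (h : ∀ r c : Int, 0 ≤ r → r < 3 → 0 ≤ c → c < 3 → w r c = w' r c)
    (visited : PySem.Set (Int × Int)) (nr nc : Int) :
    nbCond w visited nr nc = nbCond w' visited nr nc := by
  unfold nbCond
  cases hb : inb nr nc with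
  | false => simp
  | true =>
    have hb' : ((0 ≤ nr ∧ nr < 3) ∧ 0 ≤ nc) ∧ nc < 3 := by
      simpa [inb] using hb
    rw [h nr nc hb'.1.1.1 hb'.1.1.2 hb'.1.2 hb'.2]

theorem bfsA_congr (w w' : Int → Int → Bool)
    (h : ∀ r c : Int, 0 ≤ r → r < 3 → 0 ≤ c → c < 3 → w r c = w' r c) :
    ∀ (fuel : Nat) (visited : PySem.Set (Int × Int)) (queue : List (Int × Int)),
      bfsA w fuel visited queue = bfsA w' fuel visited queue := by
  intro fuel
  induction fuel with
  | zero => intro v q; rfl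
  | succ n ih =>
    intro v q
    cases q with
    | nil => rfl
    | cons p rest =>
      obtain ⟨r, c⟩ := p
      simp only [bfsA, nbCond_congr w w' h, ih]

theorem waterCells_congr (w w' : Int → Int → Bool)
    (h : ∀ r c : Int, 0 ≤ r → r < 3 → 0 ≤ c → c < 3 → w r c = w' r c) :
    waterCells w = waterCells w' := by
  have h3 : PySem.List.pyRange 0 3 1 = [0, 1, 2] := by decide
  simp only [waterCells, h3, List.foldl]
  rw [h 0 0 (by decide) (by decide) (by decide) (by decide),
      h 0 1 (by decide) (by decide) (by decide) (by decide),
      h 0 2 (by decide) (by decide) (by decide) (by decide),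
      h 1 0 (by decide) (by decide) (by decide) (by decide),
      h 1 1 (by decide) (by decide) (by decide) (by decide),
      h 1 2 (by decide) (by decide) (by decide) (by decide),
      h 2 0 (by decide) (by decide) (by decide) (by decide),
      h 2 1 (by decide) (by decide) (by decide) (by decide),
      h 2 2 (by decide) (by decide) (by decide) (by decide)]

theorem hasPool_congr (w w' : Int → Int → Bool)
    (h : ∀ r c : Int, 0 ≤ r → r < 3 → 0 ≤ c → c < 3 → w r c = w' r c) :
    hasPool w = hasPool w' := by
  have h2 : PySem.List.pyRange 0 2 1 = [0, 1] := by decide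
  simp only [hasPool, h2, List.any]
  norm_num
  rw [h 0 0 (by decide) (by decide) (by decide) (by decide),
      h 0 1 (by decide) (by decide) (by decide) (by decide),
      h 0 2 (by decide) (by decide) (by decide) (by decide),
      h 1 0 (by decide) (by decide) (by decide) (by decide),
      h 1 1 (by decide) (by decide) (by decide) (by decide),
      h 1 2 (by decide) (by decide) (by decide) (by decide),
      h 2 0 (by decide) (by decide) (by decide) (by decide),
      h 2 1 (by decide) (by decide) (by decide) (by decide),
      h 2 2 (by decide) (by decide) (by decide) (by decide)]

theorem coreA_congr (w w' : Int → Int → Bool)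
    (h : ∀ r c : Int, 0 ≤ r → r < 3 → 0 ≤ c → c < 3 → w r c = w' r c) :
    coreA w = coreA w' := by
  simp only [coreA, waterCells_congr w w' h, hasPool_congr w w' h, bfsA_congr w w' h]

theorem coreB_congr (w w' : Int → Int → Bool)
    (h : ∀ r c : Int, 0 ≤ r → r < 3 → 0 ≤ c → c < 3 → w r c = w' r c) :
    coreB w = coreB w' := by
  have hpass : ∀ par : List Int,
      (PySem.List.pyRange 0 3 1).foldl (fun par r =>
        (PySem.List.pyRange 0 3 1).foldl (fun par c =>
          if w r c then
            let par := if decide (c < 2) && w r (c + 1) then ufUnion par (3 * r + c) (3 * r + c + 1) else par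
            if decide (r < 2) && w (r + 1) c then ufUnion par (3 * r + c) (3 * r + c + 3) else par
          else par) par) par
      = (PySem.List.pyRange 0 3 1).foldl (fun par r =>
        (PySem.List.pyRange 0 3 1).foldl (fun par c =>
          if w' r c then
            let par := if decide (c < 2) && w' r (c + 1) then ufUnion par (3 * r + c) (3 * r + c + 1) else par
            if decide (r < 2) && w' (r + 1) c then ufUnion par (3 * r + c) (3 * r + c + 3) else par
          else par) par) par := by
    intro par
    refine PySem.List.foldl_congr_mem _ _ _ _ (fun par r hr => ?_)
    refine PySem.List.foldl_congr_mem _ _ _ _ (fun par c hc => ?_)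
    rw [PySem.List.mem_pyRange_one] at hr hc
    have e1 : (decide (c < 2) && w r (c + 1)) = (decide (c < 2) && w' r (c + 1)) := by
      by_cases hlt : c < 2
      · rw [h r (c + 1) hr.1 hr.2 (by omega) (by omega)]
      · simp [hlt]
    have e2 : (decide (r < 2) && w (r + 1) c) = (decide (r < 2) && w' (r + 1) c) := by
      by_cases hlt : r < 2
      · rw [h (r + 1) c (by omega) (by omega) hc.1 hc.2]
      · simp [hlt]
    rw [h r c hr.1 hr.2 hc.1 hc.2, e1, e2]
  simp only [coreB, waterCells_congr w w' h, hasPool_congr w w' h, hpass]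

set_option maxRecDepth 16384 in
set_option maxHeartbeats 2000000 in
theorem core_tab_eq : ∀ b00 b01 b02 b10 b11 b12 b20 b21 b22 : Bool,
    coreA (Wtab b00 b01 b02 b10 b11 b12 b20 b21 b22)
      = coreB (Wtab b00 b01 b02 b10 b11 b12 b20 b21 b22) := by
  decide

theorem core_eq (w : Int → Int → Bool) : coreA w = coreB w := by
  have h : ∀ r c : Int, 0 ≤ r → r < 3 → 0 ≤ c → c < 3 →
      w r c = Wtab (w 0 0) (w 0 1) (w 0 2) (w 1 0) (w 1 1) (w 1 2) (w 2 0) (w 2 1) (w 2 2) r c := by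
    intro r c h1 h2 h3 h4
    have hr : r = 0 ∨ r = 1 ∨ r = 2 := by omega
    have hc : c = 0 ∨ c = 1 ∨ c = 2 := by omega
    rcases hr with rfl | rfl | rfl <;> rcases hc with rfl | rfl | rfl <;> simp [Wtab]
  calc coreA w
      = coreA (Wtab (w 0 0) (w 0 1) (w 0 2) (w 1 0) (w 1 1) (w 1 2) (w 2 0) (w 2 1) (w 2 2)) :=
        coreA_congr _ _ h
    _ = coreB (Wtab (w 0 0) (w 0 1) (w 0 2) (w 1 0) (w 1 1) (w 1 2) (w 2 0) (w 2 1) (w 2 2)) :=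
        core_tab_eq _ _ _ _ _ _ _ _ _
    _ = coreB w := (coreB_congr _ _ h).symm

-- ===== VERDICT (by name: the statement is the Claim_ definition above) =====
theorem is_valid_water_pattern_spec : Claim_equal_is_valid_water_pattern := by
  intro grid_values _ _
  unfold Spec_is_valid_water_pattern is_valid_water_pattern is_valid_water_pattern_alt
  exact core_eq (isW grid_values)
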